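-- pv_equiv track=rewrite | github.com/arckanano/ifpi-ads-algoritmos2020 | HackerHank/strongPassword.py | has_number
-- ===== SOURCE A (Python) =====
-- def has_number(senha):
--     numbers = '1234567890'
--     for i in range(len(senha)):
--         tot = 0
--         if senha[i] in numbers:
--             tot += 1
--             if tot >= 1:
--                 return True
--
--     return False
-- ===== SOURCE B (Python) =====
-- def has_number(senha):
--     return bool(set(senha) & set('1234567890'))
-- ===== Notes on version B (the rewrite author's own statement) =====
-- stated objective: faster
-- what changed: Replaced the explicit index loop with per-character branching and an early return by a single set-intersection of the password's characters with the ten digit characters, returning whether it is nonempty.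
import Mathlib
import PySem

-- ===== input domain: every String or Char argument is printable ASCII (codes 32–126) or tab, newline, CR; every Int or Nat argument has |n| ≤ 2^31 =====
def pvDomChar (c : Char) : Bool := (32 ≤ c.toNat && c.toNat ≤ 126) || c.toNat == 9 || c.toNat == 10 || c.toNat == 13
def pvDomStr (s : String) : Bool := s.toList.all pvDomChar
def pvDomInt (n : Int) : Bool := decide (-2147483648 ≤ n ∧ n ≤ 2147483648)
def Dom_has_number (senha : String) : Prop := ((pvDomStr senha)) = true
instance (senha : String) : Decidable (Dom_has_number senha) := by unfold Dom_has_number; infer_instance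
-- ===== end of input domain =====

-- B replaces A's index loop (early return on the first digit) by one set intersection: bool(set(senha) & set('1234567890')); return value only, no side effects.

-- ===== PORT A =====
-- the 'for i in range(len(senha))' loop: walk the index list, test senha[i] in numbers, early-return True
def hasNumLoop (cs : List Char) (idxs : List Int) : Bool :=
  match idxs with
  | [] => false
  | i :: rest =>
    match PySem.List.pyGet? cs i with
    | some c => if ("1234567890".toList.contains c) then true else hasNumLoop cs rest
    | none => false   -- unreachable: i comes from range(len(senha)), always in bounds

def has_number (senha : String) : Bool :=
  hasNumLoop senha.toList (PySem.List.pyRange 0 (senha.toList.length : Int) 1)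

-- ===== PORT B =====
def has_number_alt (senha : String) : Bool :=
  !(PySem.Set.inter (PySem.Set.ofList senha.toList) (PySem.Set.ofList "1234567890".toList)).isEmpty

-- ===== PRECONDITION & SPEC =====
def Spec_has_number (senha : String) (out : Bool) : Prop := out = has_number_alt senha
instance (senha : String) (out : Bool) : Decidable (Spec_has_number senha out) := by unfold Spec_has_number; infer_instance

-- ===== CLAIM (what is proved, stated in full; the proofs are below) =====
def Claim_equal_has_number : Prop := ∀ (senha : String), Dom_has_number senha → Spec_has_number senha (has_number senha)

-- ===== LEMMAS AND PROOFS =====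

-- A's loop from index a upward equals 'any digit in the dropped suffix'
theorem hasNumLoop_eq (cs : List Char) (a : Int) (ha : 0 ≤ a) :
    hasNumLoop cs (PySem.List.pyRange a (cs.length : Int) 1)
      = (cs.drop a.toNat).any (fun c => "1234567890".toList.contains c) := by
  by_cases h : (cs.length : Int) ≤ a
  · rw [PySem.List.pyRange_one_eq_nil h]
    have : cs.length ≤ a.toNat := by omega
    simp [hasNumLoop, List.drop_eq_nil_of_le this]
  · rw [not_le] at h
    rw [PySem.List.pyRange_one_cons h]
    have hlt : a.toNat < cs.length := by omega
    have hget : PySem.List.pyGet? cs a = some cs[a.toNat] := by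
      rw [PySem.List.pyGet?_of_nonneg cs ha]
      exact List.getElem?_eq_getElem hlt
    have hdrop : cs.drop a.toNat = cs[a.toNat] :: cs.drop (a.toNat + 1) :=
      List.drop_eq_getElem_cons hlt
    have ih := hasNumLoop_eq cs (a + 1) (by omega)
    have : (a + 1).toNat = a.toNat + 1 := by omega
    rw [this] at ih
    simp only [hasNumLoop, hget, hdrop, List.any_cons, ih]
    by_cases hc : ("1234567890".toList.contains cs[a.toNat]) <;> simp
termination_by ((cs.length : Int) - a).toNat
decreasing_by omega

theorem alt_eq_any (senha : String) :
    has_number_alt senha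
      = senha.toList.any (fun c => "1234567890".toList.contains c) := by
  unfold has_number_alt
  rcases Bool.eq_false_or_eq_true (senha.toList.any (fun c => "1234567890".toList.contains c)) with h | h
  swap
  · rw [h]
    rw [List.any_eq_false] at h
    have : PySem.Set.inter (PySem.Set.ofList senha.toList) (PySem.Set.ofList "1234567890".toList) = [] := by
      rw [List.eq_nil_iff_forall_not_mem]
      intro x hx
      rw [PySem.Set.mem_inter] at hx
      rw [PySem.Set.mem_ofList, PySem.Set.mem_ofList] at hx
      exact absurd (by simpa using hx.2) (by simpa using h x hx.1)
    rw [this]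
    rfl
  · rw [h]
    rw [List.any_eq_true] at h
    obtain ⟨c, hc, hd⟩ := h
    have hmem : c ∈ PySem.Set.inter (PySem.Set.ofList senha.toList) (PySem.Set.ofList "1234567890".toList) := by
      rw [PySem.Set.mem_inter, PySem.Set.mem_ofList, PySem.Set.mem_ofList]
      exact ⟨hc, by simpa using hd⟩
    have hne : PySem.Set.inter (PySem.Set.ofList senha.toList) (PySem.Set.ofList "1234567890".toList) ≠ [] :=
      List.ne_nil_of_mem hmem
    simp only [Bool.not_eq_true']
    rw [List.isEmpty_eq_false_iff]
    exact hne

-- ===== VERDICT (by name: the statement is the Claim_ definition above) =====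
theorem has_number_spec : Claim_equal_has_number := by
  intro senha _
  unfold Spec_has_number has_number
  rw [hasNumLoop_eq senha.toList 0 le_rfl, alt_eq_any]
  simp
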